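-- pv_equiv track=rewrite | github.com/amannayak/732A74-Python | Final Lab4/text_stats.py | uniqueWordFollowingWord
-- ===== SOURCE A (Python) =====
-- def uniqueWordFollowingWord(filteredList):
--     uniqueWord = list(set(filteredList))
--     uniqueWordDict = dict.fromkeys(uniqueWord)
--     for index , word in enumerate(filteredList):
--         try:
--             if word in uniqueWordDict:
--                 nextWord = filteredList[index + 1]
--                 childDict = uniqueWordDict[word]
--                 if childDict is None:
--                     #create empty child dict if not already exit
--                     childDict = {}
--                 if nextWord in childDict:
--                     childDict[nextWord] += 1
--                 else:
--                     childDict[nextWord] = 1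
--
--                 uniqueWordDict[word] = childDict
--         except Exception:
--             pass
--
--     return uniqueWordDict
-- ===== SOURCE B (Python) =====
-- def uniqueWordFollowingWord(filteredList):
--     # Phase 1: flat bigram counts over adjacent pairs.
--     bigrams = {}
--     for pair in zip(filteredList, filteredList[1:]):
--         bigrams[pair] = bigrams.get(pair, 0) + 1
--     # Phase 2: seed every unique word with None, then pivot the flat table.
--     result = dict.fromkeys(set(filteredList))
--     for (w, nxt), c in bigrams.items():
--         child = result[w]
--         if child is None:
--             child = {}
--             result[w] = child
--         child[nxt] = c
--     return result
-- ===== Notes on version B (the rewrite author's own statement) =====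
-- stated objective: alternative
-- what changed: A builds the nested dict in one pass, looking ahead by index with a try/except guard and updating the per-word child dict incrementally; B first aggregates a flat bigram-pair count table over zip(list, list[1:]) and then pivots it into the nested dict in a second pass.
import Mathlib
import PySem

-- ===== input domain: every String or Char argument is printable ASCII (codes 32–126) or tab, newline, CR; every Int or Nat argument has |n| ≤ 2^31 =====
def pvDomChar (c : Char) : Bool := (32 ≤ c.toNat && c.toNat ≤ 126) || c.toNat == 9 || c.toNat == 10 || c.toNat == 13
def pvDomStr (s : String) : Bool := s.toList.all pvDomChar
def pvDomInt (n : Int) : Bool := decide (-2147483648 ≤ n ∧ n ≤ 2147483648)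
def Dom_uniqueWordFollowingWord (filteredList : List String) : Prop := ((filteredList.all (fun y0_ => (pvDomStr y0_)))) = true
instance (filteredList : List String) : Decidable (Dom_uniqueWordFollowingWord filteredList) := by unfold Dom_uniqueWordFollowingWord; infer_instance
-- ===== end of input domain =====

-- B re-implements A as two phases (flat bigram counting over adjacent pairs, then a pivot into
-- the nested dict) instead of A's guarded look-ahead-by-index single pass; objective: alternative.
-- The returned dict's KEY order follows Python's set(filteredList) iteration order; both ports use
-- first-occurrence order (PySem.Set.ofList) — dict outputs are compared ignoring order.

-- ===== PORT A =====
-- dict.fromkeys(ws) with value None (both Pythons call dict.fromkeys(set(...)))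
def dictFromkeysNone (ws : List String) : PySem.Dict String (Option (PySem.Dict String Int)) :=
  ws.foldl (fun d w => d.insert w none) PySem.Dict.empty

-- the childDict update: `if nextWord in childDict: +=1 else: =1`
def aChildUpdate (child : PySem.Dict String Int) (nextWord : String) : PySem.Dict String Int :=
  if child.contains nextWord then child.insert nextWord (child.getD nextWord 0 + 1)
  else child.insert nextWord 1

-- one iteration of A's `for index, word in enumerate(filteredList)` body
def aStep (filteredList : List String)
    (d : PySem.Dict String (Option (PySem.Dict String Int))) (iw : Int × String) :
    PySem.Dict String (Option (PySem.Dict String Int)) :=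
  if d.contains iw.2 then
    match PySem.List.pyGet? filteredList (iw.1 + 1) with
    | none => d                         -- IndexError on the last word → except: pass
    | some nextWord =>
      match d.get? iw.2 with
      | none => d                       -- KeyError (unreachable: guarded) → except: pass
      | some childOpt =>
        d.insert iw.2 (some (aChildUpdate (childOpt.getD PySem.Dict.empty) nextWord))
  else d

def uniqueWordFollowingWord (filteredList : List String) :
    List (String × Option (List (String × Int))) :=
  let uniqueWord : List String := PySem.Set.ofList filteredList
  let uniqueWordDict := dictFromkeysNone uniqueWord
  let final := (PySem.List.enumerate filteredList).foldl (aStep filteredList) uniqueWordDict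
  final.items.map (fun p => (p.1, p.2.map PySem.Dict.items))

-- ===== PORT B =====
-- one iteration of B's `for (w, nxt), c in bigrams.items()` body:
-- result[w] (always a key), None → fresh {}, then child[nxt] = c (in-place update = insert)
def bStep (r : PySem.Dict String (Option (PySem.Dict String Int)))
    (it : (String × String) × Int) : PySem.Dict String (Option (PySem.Dict String Int)) :=
  let child := (r.getD it.1.1 none).getD PySem.Dict.empty
  r.insert it.1.1 (some (child.insert it.1.2 it.2))

def uniqueWordFollowingWord_alt (filteredList : List String) :
    List (String × Option (List (String × Int))) :=
  let bigrams : PySem.Dict (String × String) Int :=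
    (filteredList.zip (PySem.List.slice filteredList (some 1) none)).foldl
      (fun d p => d.insert p (d.getD p 0 + 1)) PySem.Dict.empty
  let result := dictFromkeysNone (PySem.Set.ofList filteredList)
  let final := bigrams.items.foldl bStep result
  final.items.map (fun p => (p.1, p.2.map PySem.Dict.items))

-- ===== PRECONDITION & SPEC =====
def Spec_uniqueWordFollowingWord (filteredList : List String) (out : List (String × Option (List (String × Int)))) : Prop := out = uniqueWordFollowingWord_alt filteredList
instance (filteredList : List String) (out : List (String × Option (List (String × Int)))) : Decidable (Spec_uniqueWordFollowingWord filteredList out) := by unfold Spec_uniqueWordFollowingWord; infer_instance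

-- ===== CLAIM (what is proved, stated in full; the proofs are below) =====
def Claim_equal_uniqueWordFollowingWord : Prop := ∀ (filteredList : List String), Dom_uniqueWordFollowingWord filteredList → Spec_uniqueWordFollowingWord filteredList (uniqueWordFollowingWord filteredList)

-- ===== LEMMAS AND PROOFS =====

-- A's loop body, re-indexed as a function of the adjacent pair (word, nextWord)
def pairStep (d : PySem.Dict String (Option (PySem.Dict String Int))) (p : String × String) :
    PySem.Dict String (Option (PySem.Dict String Int)) :=
  if d.contains p.1 then
    match d.get? p.1 with
    | none => d
    | some childOpt => d.insert p.1 (some (aChildUpdate (childOpt.getD PySem.Dict.empty) p.2))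
  else d

-- the per-word inner update A performs for one follower
def innerStep (o : Option (PySem.Dict String Int)) (nxt : String) :
    Option (PySem.Dict String Int) :=
  some (aChildUpdate (o.getD PySem.Dict.empty) nxt)

-- the per-word inner update B performs for one (follower, count) item
def bInner (o : Option (PySem.Dict String Int)) (t : String × Int) :
    Option (PySem.Dict String Int) :=
  some ((o.getD PySem.Dict.empty).insert t.1 t.2)

-- `if nextWord in childDict` collapses: both branches insert getD+1
theorem aChildUpdate_eq (c : PySem.Dict String Int) (x : String) :
    aChildUpdate c x = c.insert x (c.getD x 0 + 1) := by
  unfold aChildUpdate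
  by_cases h : c.contains x = true
  · simp [h]
  · simp only [Bool.not_eq_true] at h
    simp [h, PySem.Dict.getD_of_not_contains _ _ h]

-- A's enumerate-and-index loop is the fold of pairStep over the adjacent pairs
theorem lemA1 (l : List String) : ∀ (t : List String) (s : Nat)
    (d : PySem.Dict String (Option (PySem.Dict String Int))), l.drop s = t →
    (PySem.List.enumerate t (s : Int)).foldl (aStep l) d = (t.zip t.tail).foldl pairStep d := by
  intro t
  induction t with
  | nil => intro s d _; simp [PySem.List.enumerate]
  | cons x xs ih =>
    intro s d hdrop
    rw [PySem.List.enumerate_cons]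
    simp only [List.foldl_cons]
    have hnext : PySem.List.pyGet? l ((s : Int) + 1) = xs.head? := by
      have hc : ((s : Int) + 1) = ((s + 1 : Nat) : Int) := by push_cast; ring
      rw [hc, PySem.List.pyGet?_natCast]
      have hd : l[s+1]? = (l.drop s)[1]? := by rw [List.getElem?_drop]
      rw [hd, hdrop]
      cases xs <;> simp
    match hxs : xs with
    | [] =>
      simp only [aStep, hnext]
      simp [PySem.List.enumerate, List.zip]
    | y :: ys =>
      have hstep : aStep l d ((s : Int), x) = pairStep d (x, y) := by
        simp only [aStep, pairStep, hnext]
        rfl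
      have hcast : (s : Int) + 1 = ((s + 1 : Nat) : Int) := by push_cast; ring
      rw [hstep, hcast, ih (s + 1) _ (by rw [← List.drop_drop, hdrop]; rfl)]
      rfl

-- keys are invariant under the pairStep fold (only contained keys are re-inserted)
theorem keys_pairStep_fold : ∀ (ps : List (String × String))
    (d : PySem.Dict String (Option (PySem.Dict String Int))),
    (∀ p ∈ ps, d.contains p.1 = true) →
    ((ps.foldl pairStep d).keys = d.keys) := by
  intro ps
  induction ps with
  | nil => simp
  | cons p ps ih =>
    intro d h
    have hc : d.contains p.1 = true := h p (by simp)
    have hkeys : (pairStep d p).keys = d.keys := by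
      unfold pairStep
      rw [if_pos hc]
      match hg : d.get? p.1 with
      | none => rfl
      | some childOpt => exact PySem.Dict.keys_insert_of_contains d _ hc
    have hcont : ∀ q ∈ ps, (pairStep d p).contains q.1 = true := by
      intro q hq
      rw [PySem.Dict.contains_iff_mem_keys, hkeys, ← PySem.Dict.contains_iff_mem_keys]
      exact h q (List.mem_cons_of_mem _ hq)
    simp only [List.foldl_cons]
    rw [ih _ hcont, hkeys]

-- pointwise value of the pairStep fold: per word, fold innerStep over its followers
theorem getD_pairStep_fold : ∀ (ps : List (String × String))
    (d : PySem.Dict String (Option (PySem.Dict String Int))) (w : String),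
    (∀ p ∈ ps, d.contains p.1 = true) →
    (ps.foldl pairStep d).getD w none =
      ((ps.filter (fun p => p.1 == w)).map (·.2)).foldl innerStep (d.getD w none) := by
  intro ps
  induction ps with
  | nil => simp
  | cons p ps ih =>
    intro d w h
    have hc : d.contains p.1 = true := h p (by simp)
    have hsome : ∃ v, d.get? p.1 = some v := by
      have := PySem.Dict.contains_eq_isSome_get? (d := d) (k := p.1)
      rw [hc] at this
      exact Option.isSome_iff_exists.mp this.symm
    obtain ⟨v, hv⟩ := hsome
    have hstep : pairStep d p = d.insert p.1 (some (aChildUpdate (v.getD PySem.Dict.empty) p.2)) := by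
      unfold pairStep; rw [if_pos hc, hv]
    have hgd : d.getD p.1 none = v := by rw [PySem.Dict.getD_eq_get?_getD, hv]; rfl
    have hcont : ∀ q ∈ ps, (pairStep d p).contains q.1 = true := by
      intro q hq
      rw [hstep, PySem.Dict.contains_insert]
      simp [h q (List.mem_cons_of_mem _ hq)]
    simp only [List.foldl_cons]
    rw [ih _ w hcont, hstep]
    by_cases hw : p.1 = w
    · subst hw
      rw [PySem.Dict.getD_insert]
      simp [innerStep, hgd]
    · rw [PySem.Dict.getD_insert, if_neg (fun hh => hw hh.symm)]
      simp [hw]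

-- keys are invariant under the bStep fold
theorem keys_bStep_fold : ∀ (its : List ((String × String) × Int))
    (r : PySem.Dict String (Option (PySem.Dict String Int))),
    (∀ it ∈ its, r.contains it.1.1 = true) →
    ((its.foldl bStep r).keys = r.keys) := by
  intro its
  induction its with
  | nil => simp
  | cons it its ih =>
    intro r h
    have hc : r.contains it.1.1 = true := h it (by simp)
    have hkeys : (bStep r it).keys = r.keys := PySem.Dict.keys_insert_of_contains r _ hc
    have hcont : ∀ q ∈ its, (bStep r it).contains q.1.1 = true := by
      intro q hq
      rw [PySem.Dict.contains_iff_mem_keys, hkeys, ← PySem.Dict.contains_iff_mem_keys]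
      exact h q (List.mem_cons_of_mem _ hq)
    simp only [List.foldl_cons]
    rw [ih _ hcont, hkeys]

-- pointwise value of the bStep fold
theorem getD_bStep_fold : ∀ (its : List ((String × String) × Int))
    (r : PySem.Dict String (Option (PySem.Dict String Int))) (w : String),
    (its.foldl bStep r).getD w none =
      ((its.filter (fun it => it.1.1 == w)).map (fun it => (it.1.2, it.2))).foldl bInner
        (r.getD w none) := by
  intro its
  induction its with
  | nil => simp
  | cons it its ih =>
    intro r w
    simp only [List.foldl_cons]
    rw [ih]
    by_cases hw : it.1.1 = w
    · subst hw
      simp only [bStep, PySem.Dict.getD_insert]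
      simp [bInner]
    · simp only [bStep, PySem.Dict.getD_insert]
      rw [if_neg (fun hh : w = it.1.1 => hw hh.symm)]
      simp [hw]

-- the seed dict: every value is none, membership is membership in ws
theorem getD_fromkeys_aux : ∀ (ws : List String)
    (d : PySem.Dict String (Option (PySem.Dict String Int))),
    (∀ w, d.getD w none = none) →
    ∀ w, (ws.foldl (fun d w => d.insert w none) d).getD w none = none := by
  intro ws
  induction ws with
  | nil => intro d h w; simpa using h w
  | cons x xs ih =>
    intro d h w
    simp only [List.foldl_cons]
    exact ih _ (fun w' => by rw [PySem.Dict.getD_insert]; split <;> simp [h]) w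

theorem getD_fromkeys (ws : List String) (w : String) :
    (dictFromkeysNone ws).getD w none = none := by
  exact getD_fromkeys_aux ws PySem.Dict.empty (fun w' => by simp) w

theorem contains_fromkeys_aux : ∀ (ws : List String)
    (d : PySem.Dict String (Option (PySem.Dict String Int))) (w : String),
    ((ws.foldl (fun d w => d.insert w none) d).contains w = true ↔
      (d.contains w = true ∨ w ∈ ws)) := by
  intro ws
  induction ws with
  | nil => simp
  | cons x xs ih =>
    intro d w
    simp only [List.foldl_cons, ih, PySem.Dict.contains_insert, List.mem_cons]
    simp [Bool.or_eq_true, beq_iff_eq]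
    tauto

theorem contains_fromkeys (ws : List String) (w : String) :
    (dictFromkeysNone ws).contains w = true ↔ w ∈ ws := by
  unfold dictFromkeysNone
  rw [contains_fromkeys_aux]
  simp

-- explicit "first occurrences, given already-seen elements" recursion
def dd {α : Type} [BEq α] (seen : List α) : List α → List α
  | [] => []
  | x :: xs => if seen.contains x then dd seen xs else x :: dd (seen ++ [x]) xs

theorem ofList_eq_dd {α : Type} [BEq α] : ∀ (xs acc : List α),
    xs.foldl PySem.Set.add acc = acc ++ dd acc xs := by
  intro xs
  induction xs with
  | nil => simp [dd]
  | cons x xs ih =>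
    intro acc
    simp only [List.foldl_cons, dd, PySem.Set.add]
    by_cases h : acc.contains x = true
    · simp [h, ih]
    · simp only [Bool.not_eq_true] at h
      simp [h, ih (acc ++ [x])]

theorem ofList_eq_dd_nil {α : Type} [BEq α] (xs : List α) :
    PySem.Set.ofList xs = dd [] xs := by
  have := ofList_eq_dd xs []
  simpa [PySem.Set.ofList, PySem.Set.empty] using this

-- first occurrences commute with filter-by-first-component + project-second
theorem dd_filter_map (w : String) : ∀ (ps : List (String × String))
    (seenP : List (String × String)) (seenF : List String),
    (∀ b, b ∈ seenF ↔ (w, b) ∈ seenP) →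
    dd seenF ((ps.filter (fun p => p.1 == w)).map (·.2)) =
      ((dd seenP ps).filter (fun p => p.1 == w)).map (·.2) := by
  intro ps
  induction ps with
  | nil => intro _ _ _; simp [dd]
  | cons p ps ih =>
    intro seenP seenF hinv
    obtain ⟨p1, p2⟩ := p
    by_cases hpw : p1 = w
    · subst hpw
      simp only [List.filter_cons, List.map_cons, beq_self_eq_true, if_pos]
      by_cases hseen : (p1, p2) ∈ seenP
      · have hF : seenF.contains p2 = true := by
          simp only [List.contains_iff_mem]; exact (hinv p2).mpr hseen
        have hP : seenP.contains (p1, p2) = true := by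
          simp only [List.contains_iff_mem]; exact hseen
        simp only [dd, hF, hP, if_true]
        exact ih seenP seenF hinv
      · have hF : seenF.contains p2 = false := by
          rw [Bool.eq_false_iff]
          exact fun hc => hseen ((hinv p2).mp (List.contains_iff_mem.mp hc))
        have hP : seenP.contains (p1, p2) = false := by
          rw [Bool.eq_false_iff]
          exact fun hc => hseen (List.contains_iff_mem.mp hc)
        simp only [dd, hF, hP, Bool.false_eq_true, if_false, List.filter_cons,
          List.map_cons, beq_self_eq_true, if_pos]
        congr 1
        refine ih _ _ (fun b => ?_)
        simp only [List.mem_append, List.mem_cons, List.not_mem_nil, or_false,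
          Prod.mk.injEq, true_and]
        rw [hinv b]
    · have hne : ((p1, p2).1 == w) = false := by simpa using hpw
      simp only [List.filter_cons, hne, Bool.false_eq_true, if_false]
      by_cases hseen : (p1, p2) ∈ seenP
      · have hP : seenP.contains (p1, p2) = true := by
          simp only [List.contains_iff_mem]; exact hseen
        simp only [dd, hP, if_true]
        exact ih seenP seenF hinv
      · have hP : seenP.contains (p1, p2) = false := by
          rw [Bool.eq_false_iff]
          exact fun hc => hseen (List.contains_iff_mem.mp hc)
        simp only [dd, hP, Bool.false_eq_true, if_false, List.filter_cons, hne]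
        refine ih _ _ (fun b => ?_)
        rw [hinv b]
        simp only [List.mem_append, List.mem_cons, List.not_mem_nil, or_false]
        constructor
        · exact fun h => Or.inl h
        · rintro (h | h)
          · exact h
          · exact absurd (congrArg Prod.fst h).symm (by simpa using hpw)

theorem set_filter_map (w : String) (ps : List (String × String)) :
    PySem.Set.ofList ((ps.filter (fun p => p.1 == w)).map (·.2)) =
      ((PySem.Set.ofList ps).filter (fun p => p.1 == w)).map (·.2) := by
  rw [ofList_eq_dd_nil, ofList_eq_dd_nil]
  exact dd_filter_map w ps [] [] (by simp)

-- counting a follower of w = counting the pair (w, follower)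
theorem count_follower (w b : String) : ∀ (ps : List (String × String)),
    ((ps.filter (fun p => p.1 == w)).map (·.2)).count b = ps.count (w, b) := by
  intro ps
  induction ps with
  | nil => simp
  | cons p ps ih =>
    obtain ⟨p1, p2⟩ := p
    by_cases h1 : p1 = w
    · subst h1
      by_cases h2 : p2 = b
      · subst h2; simp [ih]
      · simp [ih, h2, Prod.ext_iff]
    · simp [ih, h1, Prod.ext_iff]

-- folds of innerStep / bInner from a some-state stay some
theorem foldl_innerStep_some : ∀ (xs : List String) (c : PySem.Dict String Int),
    xs.foldl innerStep (some c) = some (xs.foldl (fun c x => c.insert x (c.getD x 0 + 1)) c) := by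
  intro xs
  induction xs with
  | nil => simp
  | cons x xs ih => intro c; simp [innerStep, aChildUpdate_eq, ih]

theorem foldl_bInner_some : ∀ (ts : List (String × Int)) (c : PySem.Dict String Int),
    ts.foldl bInner (some c) = some (ts.foldl (fun c t => c.insert t.1 t.2) c) := by
  intro ts
  induction ts with
  | nil => simp
  | cons t ts ih => intro c; simp [bInner, ih]

theorem foldl_innerStep_none (F : List String) :
    F.foldl innerStep none =
      if F = [] then none else some (PySem.Dict.counter F) := by
  match F with
  | [] => rfl
  | x :: F' =>
    simp only [List.foldl_cons, reduceCtorEq, if_false]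
    have h1 : innerStep none x = some (aChildUpdate PySem.Dict.empty x) := rfl
    rw [h1, foldl_innerStep_some, ← PySem.Dict.foldl_insert_getD_add_one_eq_counter]
    simp only [List.foldl_cons]
    rw [aChildUpdate_eq]

theorem foldl_bInner_none (T : List (String × Int)) :
    T.foldl bInner none =
      if T = [] then none
      else some (T.foldl (fun c t => c.insert t.1 t.2) PySem.Dict.empty) := by
  match T with
  | [] => rfl
  | t :: T' =>
    simp only [List.foldl_cons, reduceCtorEq, if_false]
    have h1 : bInner none t = some (PySem.Dict.empty.insert t.1 t.2) := rfl
    rw [h1, foldl_bInner_some]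

-- the per-word equality: A's incremental counting = B's pivot of the pair counter
theorem perWord (w : String) (ps : List (String × String)) :
    ((ps.filter (fun p => p.1 == w)).map (·.2)).foldl innerStep none =
      (((PySem.Dict.counter ps).items.filter (fun it => it.1.1 == w)).map
        (fun it => (it.1.2, it.2))).foldl bInner none := by
  have hitems := PySem.Dict.items_counter ps
  rw [hitems]
  rw [List.filter_map, List.map_map]
  set S := (PySem.Set.ofList ps).filter (fun k => k.1 == w) with hS
  have hSdef : ((PySem.Set.ofList ps).filter ((fun it => it.1.1 == w) ∘ fun k => (k, (ps.count k : Int)))) = S := by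
    rw [hS]; rfl
  rw [hSdef]
  have hT : ((fun it => (it.1.2, it.2)) ∘ fun k => (k, (ps.count k : Int))) =
      (fun k : String × String => (k.2, (ps.count k : Int))) := rfl
  rw [hT]
  set F := (ps.filter (fun p => p.1 == w)).map (·.2) with hF
  have hsf : PySem.Set.ofList F = S.map (·.2) := by rw [hF, hS]; exact set_filter_map w ps
  set T := S.map (fun k => (k.2, (ps.count k : Int))) with hTdef
  rw [foldl_innerStep_none, foldl_bInner_none]
  have hiff : F = [] ↔ T = [] := by
    constructor
    · intro h
      have h2 : S.map (·.2) = [] := by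
        rw [← hsf, h]; simp [PySem.Set.ofList, PySem.Set.empty]
      rw [hTdef, List.map_eq_nil_iff.mp h2]; rfl
    · intro h
      have hS0 : S = [] := List.map_eq_nil_iff.mp (by rw [← hTdef]; exact h)
      rw [hS0, List.map_nil] at hsf
      cases hFc : F with
      | nil => rfl
      | cons a as =>
        exfalso
        have ha : a ∈ PySem.Set.ofList F := by
          rw [PySem.Set.mem_ofList, hFc]; simp
        rw [hsf] at ha
        simp at ha
  by_cases hemp : F = []
  · rw [if_pos hemp, if_pos (hiff.mp hemp)]
  · rw [if_neg hemp, if_neg (fun h => hemp (hiff.mpr h))]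
    congr 1
    apply PySem.Dict.ext
    have hfresh : ∀ t ∈ T, (PySem.Dict.empty : PySem.Dict String Int).contains t.1 = false := by
      intro t _; simp
    have hkeysT : (T.map (·.1)).Nodup := by
      have : T.map (·.1) = S.map (·.2) := by rw [hTdef, List.map_map]; rfl
      rw [this, ← hsf]
      exact PySem.Set.nodup_ofList F
    have hins := PySem.Dict.items_foldl_insert_fresh T (·.1) (·.2) PySem.Dict.empty hfresh hkeysT
    have hinseq : (T.foldl (fun c t => c.insert t.1 t.2) PySem.Dict.empty).items = T := by
      rw [hins]
      simp [PySem.Dict.empty]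
    rw [hinseq, PySem.Dict.items_counter]
    rw [hsf, List.map_map, hTdef]
    apply List.map_congr_left
    intro k hk
    have hk1 : k.1 = w := by
      rw [hS] at hk
      have := List.of_mem_filter hk
      simpa using this
    simp only [Function.comp]
    have h1 : F.count k.2 = ps.count (w, k.2) := by rw [hF]; exact count_follower w k.2 ps
    have h2 : ((w, k.2) : String × String) = k := Prod.ext hk1.symm rfl
    rw [h1, h2]

-- ===== VERDICT (by name: the statement is the Claim_ definition above) =====
theorem uniqueWordFollowingWord_spec : Claim_equal_uniqueWordFollowingWord := by
  intro l _
  unfold Spec_uniqueWordFollowingWord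
  simp only [uniqueWordFollowingWord, uniqueWordFollowingWord_alt]
  rw [PySem.List.slice_from_one]
  set ps := l.zip l.tail with hps
  set seed := dictFromkeysNone (PySem.Set.ofList l) with hseed
  -- A's loop = pairStep fold over adjacent pairs
  have hA0 : (PySem.List.enumerate l).foldl (aStep l) seed = ps.foldl pairStep seed := by
    have := lemA1 l l 0 seed (by simp)
    simpa using this
  rw [hA0]
  -- B's counting loop = Dict.counter ps
  rw [PySem.Dict.foldl_insert_getD_add_one_eq_counter]
  -- every pair's first component is a key of the seed
  have hcontA : ∀ p ∈ ps, seed.contains p.1 = true := by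
    intro p hp
    rw [hseed, contains_fromkeys, PySem.Set.mem_ofList]
    exact (List.of_mem_zip hp).1
  have hcontB : ∀ it ∈ (PySem.Dict.counter ps).items, seed.contains it.1.1 = true := by
    intro it hit
    have hk : it.1 ∈ (PySem.Dict.counter ps).keys := PySem.Dict.mem_keys_of_mem_items _ hit
    rw [PySem.Dict.keys_counter, PySem.Set.mem_ofList] at hk
    exact hcontA it.1 hk
  -- both finals have the seed's keys, which are nodup
  have hkA := keys_pairStep_fold ps seed hcontA
  have hkB := keys_bStep_fold (PySem.Dict.counter ps).items seed hcontB
  have hseedN : seed.keys.Nodup := by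
    rw [hseed]
    exact PySem.Dict.nodup_keys_foldl_insert _ (fun _ _ => none) _ (by simp)
  -- items = keys.map (k, value at k), pointwise equal by perWord
  rw [PySem.Dict.items_eq_map_keys _ (by rw [hkA]; exact hseedN) none,
      PySem.Dict.items_eq_map_keys _ (by rw [hkB]; exact hseedN) none,
      hkA, hkB]
  apply congrArg
  apply List.map_congr_left
  intro k _
  have hvA := getD_pairStep_fold ps seed k hcontA
  have hvB := getD_bStep_fold (PySem.Dict.counter ps).items seed k
  rw [hvA, hvB, hseed, getD_fromkeys]
  rw [perWord k ps]
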